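-- pv_equiv track=rewrite | github.com/miliar/Code_Jam_Webscraper | solutions_python/Problem_138/1213.py | play_lie
-- ===== SOURCE A (Python) =====
-- def play_lie(g, b):
--     _g = g[:]
--     _b = b[:]
--     cnt = 0
--     for e in _g:
--         x = [k for k in _b if k < e]
--         if x:
--             _b.remove(x[0])
--             cnt+=1
--
--     return cnt
-- ===== SOURCE B (Python) =====
-- # Min-tree over b's positions: find & delete the leftmost element < e in O(log m)
-- # per query instead of A's O(m) scan per element of g.
--
-- def _mn(t):
--     return t[1]
--
-- def _omin(a, b):
--     if a is None:
--         return b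
--     if b is None:
--         return a
--     return a if a <= b else b
--
-- def _build(bs):
--     if len(bs) == 1:
--         return ('L', bs[0])
--     mid = len(bs) // 2
--     l = _build(bs[:mid])
--     r = _build(bs[mid:])
--     return ('N', _omin(_mn(l), _mn(r)), l, r)
--
-- def _del_lt(t, e):
--     if t[0] == 'L':
--         if t[1] is not None and t[1] < e:
--             return ('L', None), True
--         return t, False
--     m = t[1]
--     if m is None or not (m < e):
--         return t, False
--     l, r = t[2], t[3]
--     lm = _mn(l)
--     if lm is not None and lm < e:
--         l, f = _del_lt(l, e)
--     else:
--         r, f = _del_lt(r, e)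
--     return ('N', _omin(_mn(l), _mn(r)), l, r), f
--
-- def play_lie(g, b):
--     if not b:
--         return 0
--     t = _build(b)
--     cnt = 0
--     for e in g:
--         t, f = _del_lt(t, e)
--         cnt += f
--     return cnt
-- ===== Notes on version B (the rewrite author's own statement) =====
-- stated objective: faster
-- what changed: A rescans the whole remaining b list for every element of g; B builds a min-cached binary tree over b's positions once and finds & deletes the leftmost element < e by descending the tree, O(log m) per query.
import Mathlib
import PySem

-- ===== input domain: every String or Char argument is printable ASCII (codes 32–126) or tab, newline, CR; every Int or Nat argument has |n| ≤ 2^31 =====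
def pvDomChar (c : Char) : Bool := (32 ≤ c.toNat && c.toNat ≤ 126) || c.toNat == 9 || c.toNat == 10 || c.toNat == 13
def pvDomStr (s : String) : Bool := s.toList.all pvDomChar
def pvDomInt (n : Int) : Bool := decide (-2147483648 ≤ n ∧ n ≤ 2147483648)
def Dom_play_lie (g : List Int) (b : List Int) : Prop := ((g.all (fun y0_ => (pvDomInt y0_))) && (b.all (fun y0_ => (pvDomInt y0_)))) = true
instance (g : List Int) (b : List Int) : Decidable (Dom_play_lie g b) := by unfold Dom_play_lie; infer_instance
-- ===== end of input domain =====

-- B replaces A's per-element O(m) rescan of b by a min-cached binary tree over b's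
-- positions (leftmost element < e found and deleted in O(log m)); objective: faster.

-- ===== PORT A =====
-- loop body of A's 'for e in _g' (x = [k for k in _b if k < e]; if x: _b.remove(x[0]); cnt+=1)
def stepA (st : List Int × Int) (e : Int) : List Int × Int :=
  let x := st.1.filter (fun k => decide (k < e))
  match x with
  | [] => st
  | v :: _ => ((PySem.List.remove? st.1 v).getD st.1, st.2 + 1)

def play_lie (g : List Int) (b : List Int) : Int :=
  (g.foldl stepA (b, (0 : Int))).2

-- ===== PORT B =====
-- B-side helpers: min-cached binary tree over positions of b ('L' m / 'N' m l r in Source B)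
inductive MTree where
  | leaf : Option Int → MTree
  | node : Option Int → MTree → MTree → MTree
deriving DecidableEq, Repr

-- Source B _omin
def omin : Option Int → Option Int → Option Int
  | none, b => b
  | some a, none => some a
  | some a, some b => some (if a ≤ b then a else b)

-- Source B _mn
def mmin : MTree → Option Int
  | .leaf m => m
  | .node m _ _ => m

-- Source B _build (the [] arm is unreachable: play_lie_alt guards b ≠ [])
def build : List Int → MTree
  | [] => .leaf none
  | [x] => .leaf (some x)
  | x :: y :: rest =>
      let bs := x :: y :: rest
      let mid := bs.length / 2
      let l := build (bs.take mid)
      let r := build (bs.drop mid)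
      .node (omin (mmin l) (mmin r)) l r
termination_by bs => bs.length
decreasing_by
  · simp [List.length_take]; omega
  · simp; omega

-- 'v is not None and v < e' in Source B
def ltB (o : Option Int) (e : Int) : Bool :=
  match o with
  | some v => decide (v < e)
  | none => false

-- Source B _del_lt
def delLt (e : Int) : MTree → MTree × Bool
  | .leaf m => if ltB m e then (.leaf none, true) else (.leaf m, false)
  | .node m l r =>
      if ltB m e then
        if ltB (mmin l) e then
          let p := delLt e l
          (.node (omin (mmin p.1) (mmin r)) p.1 r, p.2)
        else
          let p := delLt e r
          (.node (omin (mmin l) (mmin p.1)) l p.1, p.2)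
      else (.node m l r, false)

-- loop body of B's 'for e in g' (t, f = _del_lt(t, e); cnt += f)
def stepB (st : MTree × Int) (e : Int) : MTree × Int :=
  let p := delLt e st.1
  (p.1, st.2 + (if p.2 then 1 else 0))

def play_lie_alt (g : List Int) (b : List Int) : Int :=
  match b with
  | [] => 0
  | _ :: _ => (g.foldl stepB (build b, (0 : Int))).2

-- ===== PRECONDITION & SPEC =====
def Spec_play_lie (g : List Int) (b : List Int) (out : Int) : Prop := out = play_lie_alt g b
instance (g : List Int) (b : List Int) (out : Int) : Decidable (Spec_play_lie g b out) := by unfold Spec_play_lie; infer_instance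

-- ===== CLAIM (what is proved, stated in full; the proofs are below) =====
def Claim_equal_play_lie : Prop := ∀ (g : List Int) (b : List Int), Dom_play_lie g b → Spec_play_lie g b (play_lie g b)

-- ===== LEMMAS AND PROOFS =====

-- alive elements of the tree, in position order
def alive : MTree → List Int
  | .leaf none => []
  | .leaf (some x) => [x]
  | .node _ l r => alive l ++ alive r

-- the cached min is the min of the children's caches
def WF : MTree → Prop
  | .leaf _ => True
  | .node m l r => m = omin (mmin l) (mmin r) ∧ WF l ∧ WF r

-- remove the first element < e (identity if there is none)
def eraseLt (e : Int) : List Int → List Int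
  | [] => []
  | x :: xs => if x < e then xs else x :: eraseLt e xs

theorem ltB_omin (a b : Option Int) (e : Int) :
    ltB (omin a b) e = (ltB a e || ltB b e) := by
  cases a <;> cases b <;> simp [omin, ltB] <;> split <;> simp <;> omega

theorem mmin_lt_iff (t : MTree) (e : Int) (h : WF t) :
    ltB (mmin t) e = true ↔ ∃ x ∈ alive t, x < e := by
  induction t with
  | leaf m => cases m <;> simp [mmin, alive, ltB]
  | node m l r ihl ihr =>
      obtain ⟨hm, hl, hr⟩ := h
      have h0 : mmin (MTree.node m l r) = m := rfl
      have h1 : alive (MTree.node m l r) = alive l ++ alive r := rfl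
      rw [h1, h0, hm, ltB_omin, Bool.or_eq_true, ihl hl, ihr hr]
      simp only [List.mem_append]
      constructor
      · rintro (⟨x, hx, hlt⟩ | ⟨x, hx, hlt⟩)
        · exact ⟨x, Or.inl hx, hlt⟩
        · exact ⟨x, Or.inr hx, hlt⟩
      · rintro ⟨x, hx | hx, hlt⟩
        · exact Or.inl ⟨x, hx, hlt⟩
        · exact Or.inr ⟨x, hx, hlt⟩

theorem eraseLt_of_no_lt (e : Int) (l : List Int) (h : ∀ x ∈ l, ¬ x < e) :
    eraseLt e l = l := by
  induction l with
  | nil => rfl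
  | cons x xs ih =>
      simp only [eraseLt]
      rw [if_neg (h x (by simp))]
      rw [ih (fun y hy => h y (by simp [hy]))]

theorem eraseLt_append_left (e : Int) (l₁ l₂ : List Int) (h : ∃ x ∈ l₁, x < e) :
    eraseLt e (l₁ ++ l₂) = eraseLt e l₁ ++ l₂ := by
  induction l₁ with
  | nil => simp at h
  | cons x xs ih =>
      simp only [List.cons_append, eraseLt]
      by_cases hx : x < e
      · simp [hx]
      · rw [if_neg hx, if_neg hx, ih]
        · simp
        · obtain ⟨y, hy, hlt⟩ := h
          rcases List.mem_cons.mp hy with h1 | h2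
          · omega
          · exact ⟨y, h2, hlt⟩

theorem eraseLt_append_right (e : Int) (l₁ l₂ : List Int) (h : ∀ x ∈ l₁, ¬ x < e) :
    eraseLt e (l₁ ++ l₂) = l₁ ++ eraseLt e l₂ := by
  induction l₁ with
  | nil => simp
  | cons x xs ih =>
      simp only [List.cons_append, eraseLt]
      rw [if_neg (h x (by simp)), ih (fun y hy => h y (by simp [hy]))]

theorem delLt_spec (e : Int) (t : MTree) (h : WF t) :
    WF (delLt e t).1 ∧ alive (delLt e t).1 = eraseLt e (alive t) ∧
      ((delLt e t).2 = ltB (mmin t) e) := by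
  induction t with
  | leaf m =>
      by_cases hm : ltB m e = true
      · cases m with
        | none => simp [ltB] at hm
        | some v =>
            simp only [ltB, decide_eq_true_eq] at hm
            simp [delLt, ltB, hm, alive, WF, eraseLt, mmin]
      · cases m with
        | none => simp [delLt, ltB, alive, WF, eraseLt, mmin]
        | some v =>
            simp only [ltB, decide_eq_true_eq] at hm
            simp [delLt, ltB, hm, alive, WF, eraseLt, mmin]
  | node m l r ihl ihr =>
      obtain ⟨hm, hl, hr⟩ := h
      obtain ⟨ihl1, ihl2, ihl3⟩ := ihl hl
      obtain ⟨ihr1, ihr2, ihr3⟩ := ihr hr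
      have halive : alive (MTree.node m l r) = alive l ++ alive r := rfl
      have hmm : mmin (MTree.node m l r) = m := rfl
      by_cases htop : ltB m e = true
      · by_cases hltl : ltB (mmin l) e = true
        · have hdef : delLt e (MTree.node m l r) =
              (.node (omin (mmin (delLt e l).1) (mmin r)) (delLt e l).1 r, (delLt e l).2) := by
            simp [delLt, htop, hltl]
          rw [hdef]
          refine ⟨⟨rfl, ihl1, hr⟩, ?_, ?_⟩
          · have : alive (MTree.node (omin (mmin (delLt e l).1) (mmin r)) (delLt e l).1 r)
                = alive (delLt e l).1 ++ alive r := rfl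
            rw [this, halive, ihl2,
              eraseLt_append_left e _ _ ((mmin_lt_iff l e hl).mp hltl)]
          · rw [hmm, htop, ihl3, hltl]
        · have hdef : delLt e (MTree.node m l r) =
              (.node (omin (mmin l) (mmin (delLt e r).1)) l (delLt e r).1, (delLt e r).2) := by
            simp [delLt, htop, hltl]
          have hnol : ∀ x ∈ alive l, ¬ x < e := by
            intro x hx hxe
            exact hltl ((mmin_lt_iff l e hl).mpr ⟨x, hx, hxe⟩)
          have hror : ltB (mmin r) e = true := by
            have : ltB (omin (mmin l) (mmin r)) e = true := by rw [← hm]; exact htop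
            rw [ltB_omin, Bool.or_eq_true] at this
            tauto
          rw [hdef]
          refine ⟨⟨rfl, hl, ihr1⟩, ?_, ?_⟩
          · have : alive (MTree.node (omin (mmin l) (mmin (delLt e r).1)) l (delLt e r).1)
                = alive l ++ alive (delLt e r).1 := rfl
            rw [this, halive, ihr2, eraseLt_append_right e _ _ hnol]
          · rw [hmm, htop, ihr3, hror]
      · have hdef : delLt e (MTree.node m l r) = (.node m l r, false) := by
          simp [delLt, htop]
        have hno : ∀ x ∈ alive l ++ alive r, ¬ x < e := by
          intro x hx hxe
          apply htop
          rw [hm, ltB_omin, Bool.or_eq_true]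
          rcases List.mem_append.mp hx with h1 | h2
          · exact Or.inl ((mmin_lt_iff l e hl).mpr ⟨x, h1, hxe⟩)
          · exact Or.inr ((mmin_lt_iff r e hr).mpr ⟨x, h2, hxe⟩)
        rw [hdef]
        refine ⟨⟨hm, hl, hr⟩, ?_, ?_⟩
        · rw [halive, eraseLt_of_no_lt e _ hno]
        · rw [hmm]
          simp [htop]

theorem build_spec : ∀ (n : Nat) (bs : List Int), bs.length ≤ n →
    WF (build bs) ∧ alive (build bs) = bs
  | _, [], _ => by simp [build, WF, alive]
  | _, [x], _ => by simp [build, WF, alive]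
  | 0, x :: y :: rest, hle => by simp at hle
  | Nat.succ n, x :: y :: rest, hle => by
      have h1 := build_spec n ((x :: y :: rest).take ((x :: y :: rest).length / 2))
        (by simp at hle ⊢; omega)
      have h2 := build_spec n ((x :: y :: rest).drop ((x :: y :: rest).length / 2))
        (by simp at hle ⊢; omega)
      rw [build]
      refine ⟨⟨rfl, h1.1, h2.1⟩, ?_⟩
      simp only [alive]
      rw [h1.2, h2.2, List.take_append_drop]

-- A removes (by value) the head of the filter, i.e. the first element < e
theorem remove_filter (e : Int) (l : List Int) (v : Int) (rest : List Int)
    (h : l.filter (fun k => decide (k < e)) = v :: rest) :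
    PySem.List.remove? l v = some (eraseLt e l) := by
  induction l generalizing rest with
  | nil => simp at h
  | cons x xs ih =>
      by_cases hx : x < e
      · rw [List.filter_cons_of_pos (by simp [hx])] at h
        injection h with h1 h2
        subst h1
        simp [eraseLt, hx]
      · rw [List.filter_cons_of_neg (by simp [hx])] at h
        have hv : v < e := by
          have : v ∈ xs.filter (fun k => decide (k < e)) := by rw [h]; simp
          simpa using (List.mem_filter.mp this).2
        have hne : x ≠ v := by omega
        rw [PySem.List.remove?_cons_of_ne xs hne, ih rest h]
        simp [eraseLt, hx]

theorem filter_nil_iff (e : Int) (l : List Int) :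
    l.filter (fun k => decide (k < e)) = [] ↔ ∀ x ∈ l, ¬ x < e := by
  simp [List.filter_eq_nil_iff]

-- one loop step: A's state moves to (eraseLt e l, c + χ), matching B's tree step
theorem step_sim (e : Int) (l : List Int) (t : MTree) (c : Int)
    (hwf : WF t) (hal : alive t = l) :
    stepA (l, c) e = (eraseLt e l, (stepB (t, c) e).2) ∧
      WF (stepB (t, c) e).1 ∧ alive (stepB (t, c) e).1 = eraseLt e l := by
  obtain ⟨h1, h2, h3⟩ := delLt_spec e t hwf
  rw [hal] at h2
  have hb1 : (stepB (t, c) e).1 = (delLt e t).1 := rfl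
  have hb2 : (stepB (t, c) e).2 = c + (if (delLt e t).2 then 1 else 0) := rfl
  cases hf : l.filter (fun k => decide (k < e)) with
  | nil =>
      have hno : ∀ x ∈ l, ¬ x < e := (filter_nil_iff e l).mp hf
      have hnolt : ltB (mmin t) e = false := by
        cases hb : ltB (mmin t) e
        · rfl
        · obtain ⟨x, hxm, hxe⟩ := (mmin_lt_iff t e hwf).mp hb
          exact absurd hxe (hno x (hal ▸ hxm))
      have hfalse : (delLt e t).2 = false := by rw [h3, hnolt]
      refine ⟨?_, hb1 ▸ h1, hb1 ▸ h2⟩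
      rw [hb2, hfalse]
      simp [stepA, hf, eraseLt_of_no_lt e l hno]
  | cons v rest =>
      have hex : ∃ x ∈ l, x < e := by
        have : v ∈ l.filter (fun k => decide (k < e)) := by rw [hf]; simp
        exact ⟨v, (List.mem_filter.mp this).1, by simpa using (List.mem_filter.mp this).2⟩
      have htrue : (delLt e t).2 = true := by
        rw [h3]; exact (mmin_lt_iff t e hwf).mpr (hal ▸ hex)
      refine ⟨?_, hb1 ▸ h1, hb1 ▸ h2⟩
      rw [hb2, htrue]
      simp [stepA, hf, remove_filter e l v rest hf]

theorem loop_sim (g : List Int) (l : List Int) (t : MTree) (c : Int)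
    (hwf : WF t) (hal : alive t = l) :
    (g.foldl stepA (l, c)).2 = (g.foldl stepB (t, c)).2 := by
  induction g generalizing l t c with
  | nil => rfl
  | cons e g ih =>
      obtain ⟨hA, hwf', hal'⟩ := step_sim e l t c hwf hal
      simp only [List.foldl_cons, hA]
      exact ih _ _ _ hwf' hal'

theorem play_lie_nil (g : List Int) (c : Int) : (g.foldl stepA ([], c)).2 = c := by
  induction g generalizing c with
  | nil => rfl
  | cons e g ih => simpa [stepA] using ih c

-- ===== VERDICT (by name: the statement is the Claim_ definition above) =====
theorem play_lie_spec : Claim_equal_play_lie := by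
  intro g b _
  unfold Spec_play_lie play_lie play_lie_alt
  cases b with
  | nil => simpa using play_lie_nil g 0
  | cons x xs =>
      obtain ⟨hwf, hal⟩ := build_spec (x :: xs).length (x :: xs) le_rfl
      exact loop_sim g (x :: xs) (build (x :: xs)) 0 hwf hal
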